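-- pv_equiv track=rewrite | github.com/qexa/YouTube-Automation-Tool | utils.py | generate_engagement_insights
-- ===== SOURCE A (Python) =====
-- def generate_engagement_insights(scored_titles):
--     """Generate insights about title engagement potential"""
--     insights = []
--
--     if scored_titles:
--         best_title, best_score = scored_titles[0]
--
--         insights.append(f"Highest engagement potential: '{best_title}' (Score: {best_score})")
--
--         # Analyze what makes titles engaging
--         high_scoring = [title for title, score in scored_titles if score >= 10]
--         if high_scoring:
--             insights.append(f"{len(high_scoring)} titles have high engagement potential")
--
--         # Check for emotional triggers
--         emotional_count = sum(1 for title, _ in scored_titles if any(trigger in title.lower()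
--                             for trigger in ['amazing', 'incredible', 'shocking', 'secret', 'revealed']))
--         if emotional_count > 0:
--             insights.append(f"{emotional_count} titles use emotional triggers for better engagement")
--
--         # Check for curiosity gaps
--         curiosity_count = sum(1 for title, _ in scored_titles if title.endswith('?') or
--                             any(word in title.lower() for word in ['why', 'what', 'how', 'which']))
--         if curiosity_count > 0:
--             insights.append(f"{curiosity_count} titles create curiosity gaps to drive clicks")
--
--     return insights[:4]  # Return top 4 insights
-- ===== SOURCE B (Python) =====
-- _MESSAGES = [
--     ("high", "titles have high engagement potential"),
--     ("emotional", "titles use emotional triggers for better engagement"),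
--     ("curiosity", "titles create curiosity gaps to drive clicks"),
-- ]
--
-- def _tags(title, score):
--     """Classify one scored title into zero or more engagement tags."""
--     low = title.lower()
--     tags = []
--     if score >= 10:
--         tags.append("high")
--     if any(t in low for t in ('amazing', 'incredible', 'shocking', 'secret', 'revealed')):
--         tags.append("emotional")
--     if title.endswith('?') or any(w in low for w in ('why', 'what', 'how', 'which')):
--         tags.append("curiosity")
--     return tags
--
-- def generate_engagement_insights(scored_titles):
--     """Generate insights about title engagement potential (tag classifier + counter dict + message table)"""
--     if not scored_titles:
--         return []
--     best_title, best_score = scored_titles[0]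
--     insights = [f"Highest engagement potential: '{best_title}' (Score: {best_score})"]
--     counts = {tag: 0 for tag, _ in _MESSAGES}
--     for title, score in scored_titles:
--         for tag in _tags(title, score):
--             counts[tag] += 1
--     for tag, msg in _MESSAGES:
--         if counts[tag] > 0:
--             insights.append(f"{counts[tag]} {msg}")
--     return insights[:4]
-- ===== Notes on version B (the rewrite author's own statement) =====
-- stated objective: alternative
-- what changed: Replaces A's three independent scans with a per-title tag classifier feeding a counter dictionary initialised from a declarative tag->message table, and emits the insight strings by iterating that table; same output.
import Mathlib
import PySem

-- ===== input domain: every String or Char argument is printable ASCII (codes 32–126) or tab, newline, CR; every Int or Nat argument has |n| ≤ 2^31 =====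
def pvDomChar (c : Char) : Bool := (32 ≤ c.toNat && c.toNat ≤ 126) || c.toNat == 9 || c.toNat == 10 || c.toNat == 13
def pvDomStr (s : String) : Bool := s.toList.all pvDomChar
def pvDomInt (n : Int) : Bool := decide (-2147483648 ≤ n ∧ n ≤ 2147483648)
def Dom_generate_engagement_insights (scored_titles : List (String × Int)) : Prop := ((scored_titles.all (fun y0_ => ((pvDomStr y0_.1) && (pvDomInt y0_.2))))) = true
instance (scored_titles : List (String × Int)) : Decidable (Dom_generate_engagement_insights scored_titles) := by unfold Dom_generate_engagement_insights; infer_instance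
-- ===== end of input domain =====

-- B replaces A's three independent scans with a per-title tag classifier feeding a counter
-- dictionary, and emits the insights from a declarative tag→message table; same output.

-- ===== PORT A =====
def pvEmoA (title : String) : Bool :=
  (["amazing", "incredible", "shocking", "secret", "revealed"]).any
    (fun trigger => PySem.Str.isIn trigger (PySem.Str.lower title))

def pvCurA (title : String) : Bool :=
  PySem.Str.endswith title "?" ||
    (["why", "what", "how", "which"]).any
      (fun word => PySem.Str.isIn word (PySem.Str.lower title))

def generate_engagement_insights (scored_titles : List (String × Int)) : List String :=
  let insights : List String := []
  let insights :=
    match scored_titles with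
    | [] => insights
    | (best_title, best_score) :: _ =>
      let insights := insights ++
        ["Highest engagement potential: '" ++ best_title ++ "' (Score: " ++
          PySem.Int.toStr best_score ++ ")"]
      let high_scoring := (scored_titles.filter (fun (p : String × Int) => decide (p.2 ≥ 10))).map (fun (p : String × Int) => p.1)
      let insights :=
        if high_scoring.isEmpty then insights
        else insights ++
          [PySem.Int.toStr (high_scoring.length : Int) ++ " titles have high engagement potential"]
      let emotional_count : Int :=
        ((scored_titles.filter (fun (p : String × Int) => pvEmoA p.1)).map (fun _ => (1 : Int))).sum
      let insights :=
        if emotional_count > 0 then insights ++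
          [PySem.Int.toStr emotional_count ++ " titles use emotional triggers for better engagement"]
        else insights
      let curiosity_count : Int :=
        ((scored_titles.filter (fun (p : String × Int) => pvCurA p.1)).map (fun _ => (1 : Int))).sum
      let insights :=
        if curiosity_count > 0 then insights ++
          [PySem.Int.toStr curiosity_count ++ " titles create curiosity gaps to drive clicks"]
        else insights
      insights
  insights.take 4

-- ===== PORT B =====
def pvMessages : List (String × String) :=
  [("high", "titles have high engagement potential"),
   ("emotional", "titles use emotional triggers for better engagement"),
   ("curiosity", "titles create curiosity gaps to drive clicks")]

def pvTags (title : String) (score : Int) : List String :=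
  let low := PySem.Str.lower title
  let tags : List String := []
  let tags := if score ≥ 10 then tags ++ ["high"] else tags
  let tags :=
    if (["amazing", "incredible", "shocking", "secret", "revealed"]).any
        (fun t => PySem.Str.isIn t low) then tags ++ ["emotional"] else tags
  let tags :=
    if PySem.Str.endswith title "?" ||
        (["why", "what", "how", "which"]).any (fun w => PySem.Str.isIn w low)
      then tags ++ ["curiosity"] else tags
  tags

def generate_engagement_insights_alt (scored_titles : List (String × Int)) : List String :=
  match scored_titles with
  | [] => []
  | (best_title, best_score) :: _ =>
    let insights : List String :=
      ["Highest engagement potential: '" ++ best_title ++ "' (Score: " ++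
        PySem.Int.toStr best_score ++ ")"]
    -- counts = {tag: 0 for tag, _ in _MESSAGES}
    let counts : PySem.Dict String Int :=
      pvMessages.foldl (fun d p => d.insert p.1 0) PySem.Dict.empty
    -- for title, score in scored_titles: for tag in _tags(title, score): counts[tag] += 1
    let counts :=
      scored_titles.foldl
        (fun d p => (pvTags p.1 p.2).foldl (fun d tag => d.modify tag 0 (· + 1)) d) counts
    -- for tag, msg in _MESSAGES: if counts[tag] > 0: insights.append(...)
    let insights :=
      pvMessages.foldl
        (fun acc p =>
          if counts.getD p.1 0 > 0 then
            acc ++ [PySem.Int.toStr (counts.getD p.1 0) ++ " " ++ p.2]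
          else acc) insights
    insights.take 4

-- ===== PRECONDITION & SPEC =====
def Spec_generate_engagement_insights (scored_titles : List (String × Int)) (out : List String) : Prop := out = generate_engagement_insights_alt scored_titles
instance (scored_titles : List (String × Int)) (out : List String) : Decidable (Spec_generate_engagement_insights scored_titles out) := by unfold Spec_generate_engagement_insights; infer_instance

-- ===== CLAIM =====
def Claim_equal_generate_engagement_insights : Prop := ∀ (scored_titles : List (String × Int)), Dom_generate_engagement_insights scored_titles → Spec_generate_engagement_insights scored_titles (generate_engagement_insights scored_titles)

-- ===== LEMMAS AND PROOFS =====

-- the counting loop: final getD of any tag = initial + total tag count across titles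
theorem pv_getD_count_loop (l : List (String × Int)) (d : PySem.Dict String Int) (v : String) :
    (l.foldl (fun d p => (pvTags p.1 p.2).foldl (fun d tag => d.modify tag 0 (· + 1)) d) d).getD v 0
      = d.getD v 0 + ((l.map (fun p => ((pvTags p.1 p.2).count v : Int))).sum) := by
  induction l generalizing d with
  | nil => simp
  | cons h t ih =>
    simp only [List.foldl_cons, ih, PySem.Dict.getD_foldl_modify_add_one, List.map_cons,
      List.sum_cons]
    ring

theorem pv_count_high (t : String) (s : Int) :
    ((pvTags t s).count "high" : Int) = if s ≥ 10 then 1 else 0 := by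
  unfold pvTags
  simp only [apply_ite (List.count "high"), List.count_append]
  norm_num [List.count_cons, List.count_nil]

theorem pv_count_emo (t : String) (s : Int) :
    ((pvTags t s).count "emotional" : Int) = if pvEmoA t then 1 else 0 := by
  unfold pvTags pvEmoA
  simp only [apply_ite (List.count "emotional"), List.count_append]
  norm_num [List.count_cons, List.count_nil]

theorem pv_count_cur (t : String) (s : Int) :
    ((pvTags t s).count "curiosity" : Int) = if pvCurA t then 1 else 0 := by
  unfold pvTags pvCurA
  simp only [apply_ite (List.count "curiosity"), List.count_append]
  norm_num [List.count_cons, List.count_nil]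

theorem pv_sum_if_countP (l : List (String × Int)) (p : String × Int → Bool) :
    ((l.map (fun x => if p x then (1 : Int) else 0)).sum) = (l.countP p : Int) := by
  induction l with
  | nil => simp
  | cons h t ih =>
    simp only [List.map_cons, List.sum_cons, List.countP_cons, ih]
    split_ifs <;> push_cast <;> omega

theorem pv_sum_ones (l : List (String × Int)) (p : String × Int → Bool) :
    ((l.filter p).map (fun _ => (1 : Int))).sum = ((l.countP p : Nat) : Int) := by
  rw [List.countP_eq_length_filter]
  generalize l.filter p = m
  induction m with
  | nil => simp
  | cons h t ih => simp [ih]; omega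

-- ===== VERDICT =====
set_option maxHeartbeats 1000000 in
theorem generate_engagement_insights_spec : Claim_equal_generate_engagement_insights := by
  intro st _
  unfold Spec_generate_engagement_insights
  cases st with
  | nil => rfl
  | cons h t =>
    obtain ⟨bt, bs⟩ := h
    simp only [generate_engagement_insights, generate_engagement_insights_alt]
    generalize hl : ((bt, bs) :: t : List (String × Int)) = l
    have hne : l ≠ [] := by rw [← hl]; simp
    simp only [pvMessages, List.foldl_cons, List.foldl_nil, pv_getD_count_loop]
    have hg : ∀ v : String,
        ((((PySem.Dict.empty.insert "high" (0 : Int)).insert "emotional" 0).insert "curiosity" 0).getD v 0) = 0 := by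
      intro v
      simp [PySem.Dict.getD_insert, PySem.Dict.getD_empty]
    rw [hg "high", hg "emotional", hg "curiosity"]
    have e1 : (fun p : String × Int => ((pvTags p.1 p.2).count "high" : Int))
        = fun p : String × Int => if decide (p.2 ≥ 10) then 1 else 0 := by
      funext p; rw [pv_count_high]; simp
    have e2 : (fun p : String × Int => ((pvTags p.1 p.2).count "emotional" : Int))
        = fun p : String × Int => if pvEmoA p.1 then 1 else 0 := by
      funext p; rw [pv_count_emo]
    have e3 : (fun p : String × Int => ((pvTags p.1 p.2).count "curiosity" : Int))
        = fun p : String × Int => if pvCurA p.1 then 1 else 0 := by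
      funext p; rw [pv_count_cur]
    simp only [e1, e2, e3, pv_sum_if_countP, pv_sum_ones, zero_add,
      List.isEmpty_iff, List.map_eq_nil_iff, List.length_map, ← List.countP_eq_length_filter]
    have s1 : (" " : String) ++ "titles have high engagement potential"
        = " titles have high engagement potential" := rfl
    have s2 : (" " : String) ++ "titles use emotional triggers for better engagement"
        = " titles use emotional triggers for better engagement" := rfl
    have s3 : (" " : String) ++ "titles create curiosity gaps to drive clicks"
        = " titles create curiosity gaps to drive clicks" := rfl
    simp only [String.append_assoc, s1, s2, s3]
    set hc := l.countP (fun (p : String × Int) => decide (p.2 ≥ 10)) with hhc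
    set ec := l.countP (fun (p : String × Int) => pvEmoA p.1) with hec
    set cc := l.countP (fun (p : String × Int) => pvCurA p.1) with hcc
    have h1 : l.filter (fun (p : String × Int) => decide (p.2 ≥ 10)) = [] ↔ hc = 0 := by
      simp [hhc, List.countP_eq_length_filter, List.length_eq_zero_iff]
    simp only [h1]
    split_ifs <;> first | omega | rfl
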